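-- pv_equiv track=rewrite | github.com/KhalilSayah/IA-School | scripts/visualisations/amelia_visualisation.py | recherche_dichotomique_graph
-- ===== SOURCE A (Python) =====
-- def recherche_dichotomique_graph(d,target):
--     d.sort()
--     debut,fin = 0,len(d) -1
--
--     while debut <= fin:
--         mid = (debut + fin) // 2
--         yield mid
--
--         if d[mid] == target:
--             return mid
--         elif d[mid] < target:
--             debut = mid + 1
--         else:
--             fin = mid - 1
-- ===== SOURCE B (Python) =====
-- def recherche_dichotomique_graph(d, target):
--     d.sort()
--
--     def go(sub, offset):
--         if not sub:
--             return None
--         m = (len(sub) - 1) // 2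
--         idx = offset + m
--         yield idx
--         v = sub[m]
--         if v == target:
--             return idx
--         if v < target:
--             return (yield from go(sub[m + 1:], idx + 1))
--         return (yield from go(sub[:m], offset))
--
--     return (yield from go(d, 0))
-- ===== Notes on version B (the rewrite author's own statement) =====
-- stated objective: alternative
-- what changed: Replaces A's in-place while loop over absolute indices (debut, fin) with a recursive helper generator that works on sublist slices with an offset (sub[m+1:] / sub[:m]), forwarding yields with 'yield from' and propagating the found index as the return value.
import Mathlib
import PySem

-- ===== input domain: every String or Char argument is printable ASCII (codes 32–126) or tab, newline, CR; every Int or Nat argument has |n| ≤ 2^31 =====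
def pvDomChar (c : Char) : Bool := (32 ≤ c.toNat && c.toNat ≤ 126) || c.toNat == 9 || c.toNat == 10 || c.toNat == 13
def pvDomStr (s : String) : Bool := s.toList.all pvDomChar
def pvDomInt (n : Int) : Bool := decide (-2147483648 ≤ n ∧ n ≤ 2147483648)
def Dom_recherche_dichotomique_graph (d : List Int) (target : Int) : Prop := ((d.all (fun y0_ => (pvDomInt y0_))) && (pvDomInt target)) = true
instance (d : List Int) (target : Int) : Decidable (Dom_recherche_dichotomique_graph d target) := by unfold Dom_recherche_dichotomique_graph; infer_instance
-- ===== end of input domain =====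

-- B replaces A's in-place while loop over absolute indices (debut, fin) with a recursive helper
-- generator over sublist slices carrying an offset; same probe sequence, different decomposition
-- (B's slicing copies make it no faster). Both A and B sort the argument list in place (a
-- caller-visible mutation); the equivalence proved here is about the yielded index sequence.


-- ===== PORT A =====
-- A's while loop: forward accumulator of yielded mids, state (debut, fin) updated in place.
-- The Nat fuel is only a totality guard (the interval shrinks each step, so length+1 is never exhausted).
def pvALoop (s : List Int) (target : Int) : Nat → Int → Int → List Int → List Int
  | 0, _, _, acc => acc
  | fuel + 1, debut, fin, acc =>
    if debut ≤ fin then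
      let mid := PySem.Int.floordiv (debut + fin) 2
      let v := (PySem.List.pyGet? s mid).getD 0
      if v = target then acc ++ [mid]
      else if v < target then pvALoop s target fuel (mid + 1) fin (acc ++ [mid])
      else pvALoop s target fuel debut (mid - 1) (acc ++ [mid])
    else acc

def recherche_dichotomique_graph (d : List Int) (target : Int) : List Int :=
  pvALoop (PySem.List.sorted d (fun x => x)) target (d.length + 1) 0 ((d.length : Int) - 1) []

-- ===== PORT B =====
-- B's recursive helper go(sub, offset): probes the middle of the slice, then recurses on
-- sub[m+1:] (= sub.drop (m+1)) or sub[:m] (= sub.take m); slices are exact here since the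
-- bounds are in [0, len(sub)]. The yields of a call are the list it returns.
def pvGo (target : Int) (sub : List Int) (offset : Int) : List Int :=
  if hnil : sub = [] then []
  else
    let m : Nat := (sub.length - 1) / 2
    let idx := offset + (m : Int)
    let v := (PySem.List.pyGet? sub (m : Int)).getD 0
    if v = target then [idx]
    else if v < target then idx :: pvGo target (sub.drop (m + 1)) (idx + 1)
    else idx :: pvGo target (sub.take m) offset
termination_by sub.length
decreasing_by
  · have := List.length_pos_iff.mpr hnil; simp; omega
  · have := List.length_pos_iff.mpr hnil
    have hm : (sub.length - 1) / 2 < sub.length := by omega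
    simpa [List.length_take] using hm

def recherche_dichotomique_graph_alt (d : List Int) (target : Int) : List Int :=
  pvGo target (PySem.List.sorted d (fun x => x)) 0

-- ===== PRECONDITION & SPEC =====
def Spec_recherche_dichotomique_graph (d : List Int) (target : Int) (out : List Int) : Prop := out = recherche_dichotomique_graph_alt d target
instance (d : List Int) (target : Int) (out : List Int) : Decidable (Spec_recherche_dichotomique_graph d target out) := by unfold Spec_recherche_dichotomique_graph; infer_instance

-- ===== CLAIM (what is proved, stated in full; the proofs are below) =====
def Claim_equal_recherche_dichotomique_graph : Prop := ∀ (d : List Int) (target : Int), Dom_recherche_dichotomique_graph d target → Spec_recherche_dichotomique_graph d target (recherche_dichotomique_graph d target)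

-- ===== LEMMAS AND PROOFS =====
-- Main invariant: A's loop on the window [db, db+L-1] of s appends exactly what B's helper
-- produces on the slice (s.drop db).take L with offset db.
theorem pvALoop_eq_go (s : List Int) (target : Int) :
    ∀ (fuel L db : Nat) (acc : List Int), db + L ≤ s.length → L < fuel →
      pvALoop s target fuel (db : Int) ((db : Int) + (L : Int) - 1) acc
        = acc ++ pvGo target ((s.drop db).take L) (db : Int) := by
  intro fuel
  induction fuel with
  | zero => intro L db acc _ h; omega
  | succ fuel ih =>
    intro L db acc hlen hfuel
    match L with
    | 0 =>
      rw [pvALoop, pvGo]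
      simp
    | L' + 1 =>
      set m : Nat := L' / 2 with hm
      have hmL : m ≤ L' := by omega
      have hsub : (s.drop db).take (L' + 1) ≠ [] := by
        have : ((s.drop db).take (L' + 1)).length = L' + 1 := by
          simp [List.length_take, List.length_drop]; omega
        intro hnil; rw [hnil] at this; simp at this
      have hsublen : ((s.drop db).take (L' + 1)).length = L' + 1 := by
        simp [List.length_take, List.length_drop]; omega
      have hmid : PySem.Int.floordiv ((db : Int) + ((db : Int) + (↑(L' + 1) : Int) - 1)) 2
          = ((db + m : Nat) : Int) := by
        have : (db : Int) + ((db : Int) + (↑(L' + 1) : Int) - 1) = ((2 * db + L' : Nat) : Int) := by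
          push_cast; ring
        rw [this]
        have := PySem.Int.floordiv_natCast (2 * db + L') 2
        rw [show ((2 : Nat) : Int) = (2 : Int) from rfl] at this
        rw [this]
        congr 1
        omega
      have hv : (PySem.List.pyGet? s ((db + m : Nat) : Int)).getD 0
          = (PySem.List.pyGet? ((s.drop db).take (L' + 1)) ((m : Nat) : Int)).getD 0 := by
        rw [PySem.List.pyGet?_natCast, PySem.List.pyGet?_natCast]
        congr 1
        rw [List.getElem?_take_of_lt (by omega), List.getElem?_drop]
      rw [pvALoop, pvGo]
      rw [dif_neg hsub]
      simp only [hsublen]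
      rw [if_pos (by push_cast; omega)]
      simp only [hmid, hv]
      have hms : (L' + 1 - 1) / 2 = m := by omega
      rw [hms]
      split_ifs with h1 h2
      · simp
      · -- less: recurse right
        have e1 : ((db + m : Nat) : Int) + 1 = ((db + m + 1 : Nat) : Int) := by push_cast; ring
        have e2 : (db : Int) + ((L' + 1 : Nat) : Int) - 1
            = ((db + m + 1 : Nat) : Int) + ((L' - m : Nat) : Int) - 1 := by push_cast; omega
        rw [e1, e2, ih (L' - m) (db + m + 1) (acc ++ [((db + m : Nat) : Int)]) (by omega) (by omega)]
        have hslice : ((s.drop db).take (L' + 1)).drop (m + 1)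
            = (s.drop (db + m + 1)).take (L' - m) := by
          rw [List.drop_take, List.drop_drop]
          congr 1
          omega
        rw [hslice, List.append_assoc]
        congr 2
      · -- greater: recurse left
        have e2 : ((db + m : Nat) : Int) - 1 = (db : Int) + (m : Int) - 1 := by push_cast; ring
        rw [e2, ih m db (acc ++ [((db + m : Nat) : Int)]) (by omega) (by omega)]
        have hslice : ((s.drop db).take (L' + 1)).take m = (s.drop db).take m := by
          rw [List.take_take]; congr 1; omega
        rw [hslice, List.append_assoc]
        congr 2

-- ===== VERDICT (by name: the statement is the Claim_ definition above) =====
theorem recherche_dichotomique_graph_spec : Claim_equal_recherche_dichotomique_graph := by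
  intro d target _
  unfold Spec_recherche_dichotomique_graph recherche_dichotomique_graph recherche_dichotomique_graph_alt
  have h := pvALoop_eq_go (PySem.List.sorted d (fun x => x)) target (d.length + 1) d.length 0 []
    (by simp [PySem.List.length_sorted]) (by omega)
  simp only [List.drop_zero] at h
  rw [List.take_of_length_le (by simp [PySem.List.length_sorted])] at h
  simpa using h
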